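-- pv_equiv track=rewrite | github.com/Amalife/sem_sim | sem_sim/use_cases/utils.py | make_ids
-- ===== SOURCE A (Python) =====
-- def make_ids(sent):
--     word_indices = []
--     length = len(sent)
--     i = 0
--
--     while i < length:
--         if sent[i].isspace():
--             i += 1
--             continue
--
--         start = i
--         while i < length and not sent[i].isspace():
--             i += 1
--         end = i - 1
--
--         word_indices.append((start, end+1))
--
--     return word_indices
-- ===== SOURCE B (Python) =====
-- def make_ids(sent):
--     n = len(sent)
--     starts = [i for i in range(n)
--               if not sent[i].isspace() and (i == 0 or sent[i - 1].isspace())]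
--     ends = [i + 1 for i in range(n)
--             if not sent[i].isspace() and (i == n - 1 or sent[i + 1].isspace())]
--     return list(zip(starts, ends))
-- ===== Notes on version B (the rewrite author's own statement) =====
-- stated objective: alternative
-- what changed: Replaces A's stateful while-loop scan by boundary detection: two index comprehensions collect word-start and word-end positions independently (by comparing each character with its neighbour) and are zipped into the result.
import Mathlib
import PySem

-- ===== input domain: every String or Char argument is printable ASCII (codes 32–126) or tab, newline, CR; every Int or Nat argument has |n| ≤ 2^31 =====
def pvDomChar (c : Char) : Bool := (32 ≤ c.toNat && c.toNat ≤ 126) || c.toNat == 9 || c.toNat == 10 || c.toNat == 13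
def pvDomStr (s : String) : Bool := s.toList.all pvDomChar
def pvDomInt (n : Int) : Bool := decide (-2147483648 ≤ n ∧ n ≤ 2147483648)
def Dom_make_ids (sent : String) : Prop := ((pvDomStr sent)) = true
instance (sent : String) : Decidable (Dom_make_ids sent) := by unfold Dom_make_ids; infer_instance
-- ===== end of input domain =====

-- B replaces A's stateful while-loop scan by boundary detection: two index comprehensions
-- collect word-start and word-end positions independently and are zipped (alternative, same O(n)).


-- ===== PORT A =====
-- inner 'while i < length and not sent[i].isspace(): i += 1' — consumes the word,
-- returns the remaining characters and the new index i
def pvSkipWord (cs : List Char) (i : Int) : List Char × Int :=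
  match cs with
  | [] => ([], i)
  | c :: rest => if PySem.Chars.isspace c then (c :: rest, i) else pvSkipWord rest (i + 1)

theorem pvSkipWord_fst_len_le (cs : List Char) (i : Int) :
    (pvSkipWord cs i).1.length ≤ cs.length := by
  induction cs generalizing i with
  | nil => simp [pvSkipWord]
  | cons c rest ih =>
    simp only [pvSkipWord]
    split
    · simp
    · exact le_trans (ih (i + 1)) (by simp)

-- outer 'while i < length' loop, carrying the index i and the rest of the string
def pvGoA (cs : List Char) (i : Int) : List (Int × Int) :=
  match cs with
  | [] => []
  | c :: rest =>
    if PySem.Chars.isspace c then pvGoA rest (i + 1)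
    else
      let p := pvSkipWord rest (i + 1)
      (i, p.2) :: pvGoA p.1 p.2
termination_by cs.length
decreasing_by
  all_goals
    have := pvSkipWord_fst_len_le rest (i + 1)
    simp only [List.length_cons]
    omega

def make_ids (sent : String) : List (Int × Int) := pvGoA sent.toList 0

-- ===== PORT B =====
-- 'not sent[i].isspace() and (i == 0 or sent[i-1].isspace())'; index i is drawn from
-- range(n), so sent[i] is always in range and getD with a dummy default is exact
def pvIsStartB (cs : List Char) (i : Nat) : Bool :=
  !PySem.Chars.isspace (cs.getD i ' ') && (i == 0 || PySem.Chars.isspace (cs.getD (i - 1) ' '))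

-- 'not sent[i].isspace() and (i == n - 1 or sent[i+1].isspace())'
def pvIsEndB (cs : List Char) (n i : Nat) : Bool :=
  !PySem.Chars.isspace (cs.getD i ' ') && (i == n - 1 || PySem.Chars.isspace (cs.getD (i + 1) ' '))

def make_ids_alt (sent : String) : List (Int × Int) :=
  let cs := sent.toList
  let n := cs.length
  let starts := ((List.range n).filter (pvIsStartB cs)).map (fun (i : Nat) => (i : Int))
  let ends := ((List.range n).filter (pvIsEndB cs n)).map (fun (i : Nat) => (i : Int) + 1)
  starts.zip ends

-- ===== PRECONDITION & SPEC =====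
def Spec_make_ids (sent : String) (out : List (Int × Int)) : Prop := out = make_ids_alt sent
instance (sent : String) (out : List (Int × Int)) : Decidable (Spec_make_ids sent out) := by unfold Spec_make_ids; infer_instance

-- ===== CLAIM (what is proved, stated in full; the proofs are below) =====
def Claim_equal_make_ids : Prop := ∀ (sent : String), Dom_make_ids sent → Spec_make_ids sent (make_ids sent)

-- ===== LEMMAS AND PROOFS =====

-- reference machine: one character at a time, cur = pending word start (if any)
def pvM (cs : List Char) (i : Int) (cur : Option Int) : List (Int × Int) :=
  match cs, cur with
  | [], none => []
  | [], some s => [(s, i)]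
  | c :: rest, none =>
    if PySem.Chars.isspace c then pvM rest (i + 1) none else pvM rest (i + 1) (some i)
  | c :: rest, some s =>
    if PySem.Chars.isspace c then (s, i) :: pvM rest (i + 1) none else pvM rest (i + 1) (some s)

-- recursive forms of B's two filtered index lists (prev = 'previous char is a space / i = 0')
def pvSB (prev : Bool) : List Char → List Nat
  | [] => []
  | c :: rest =>
    (if !PySem.Chars.isspace c && prev then [0] else []) ++
      (pvSB (PySem.Chars.isspace c) rest).map (· + 1)

def pvEB : List Char → List Nat
  | [] => []
  | c :: rest =>
    (if !PySem.Chars.isspace c && (rest.length == 0 || PySem.Chars.isspace (rest.getD 0 ' '))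
      then [0] else []) ++ (pvEB rest).map (· + 1)

-- generalized start predicate (pvIsStartB is the prev = true instance)
def pvSP (prev : Bool) (cs : List Char) (i : Nat) : Bool :=
  !PySem.Chars.isspace (cs.getD i ' ') &&
    (if i == 0 then prev else PySem.Chars.isspace (cs.getD (i - 1) ' '))

def pvMap (off : Int) (l : List Nat) : List Int := l.map (fun (i : Nat) => (i : Int) + off)

theorem pvMap_shift (off : Int) (l : List Nat) :
    pvMap off (l.map (· + 1)) = pvMap (off + 1) l := by
  induction l with
  | nil => rfl
  | cons a t ih => simp [pvMap, List.map] at *; exact ⟨by omega, ih⟩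

theorem pvIsStartB_eq (cs : List Char) (i : Nat) : pvIsStartB cs i = pvSP true cs i := by
  unfold pvIsStartB pvSP
  cases h : (i == 0) <;> simp

theorem filter_pvSP (cs : List Char) : ∀ prev,
    (List.range cs.length).filter (pvSP prev cs) = pvSB prev cs := by
  induction cs with
  | nil => intro prev; rfl
  | cons c rest ih =>
    intro prev
    rw [List.length_cons, List.range_succ_eq_map, List.filter_cons]
    have h0 : pvSP prev (c :: rest) 0 = (!PySem.Chars.isspace c && prev) := by
      simp [pvSP]
    have hmap : (List.map Nat.succ (List.range rest.length)).filter (pvSP prev (c :: rest)) =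
        ((List.range rest.length).filter (pvSP (PySem.Chars.isspace c) rest)).map Nat.succ := by
      rw [List.filter_map]
      congr 1
      apply List.filter_congr
      intro i _
      simp only [Function.comp]
      unfold pvSP
      cases i with
      | zero => simp
      | succ k => simp
    rw [hmap, ih, h0]
    have hsucc : List.map Nat.succ (pvSB (PySem.Chars.isspace c) rest) =
        (pvSB (PySem.Chars.isspace c) rest).map (· + 1) := by
      apply List.map_congr_left; intro a _; rfl
    simp only [pvSB]
    cases hc : (!PySem.Chars.isspace c && prev) <;> simp [hsucc]

theorem filter_pvE (cs : List Char) :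
    (List.range cs.length).filter (pvIsEndB cs cs.length) = pvEB cs := by
  induction cs with
  | nil => rfl
  | cons c rest ih =>
    rw [List.length_cons, List.range_succ_eq_map, List.filter_cons]
    have h0 : pvIsEndB (c :: rest) (rest.length + 1) 0 =
        (!PySem.Chars.isspace c &&
          (rest.length == 0 || PySem.Chars.isspace (rest.getD 0 ' '))) := by
      unfold pvIsEndB
      cases rest <;> simp
    have hmap : (List.map Nat.succ (List.range rest.length)).filter
          (pvIsEndB (c :: rest) (rest.length + 1)) =
        ((List.range rest.length).filter (pvIsEndB rest rest.length)).map Nat.succ := by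
      rw [List.filter_map]
      congr 1
      apply List.filter_congr
      intro i hi
      have hlt : i < rest.length := List.mem_range.mp hi
      simp only [Function.comp]
      unfold pvIsEndB
      have hbeq : (Nat.succ i == rest.length + 1 - 1) = (i == rest.length - 1) := by
        rw [Bool.eq_iff_iff]
        simp only [beq_iff_eq]
        omega
      rw [hbeq]
      simp
    rw [hmap, ih, h0]
    have hsucc : List.map Nat.succ (pvEB rest) = (pvEB rest).map (· + 1) := by
      apply List.map_congr_left; intro a _; rfl
    simp only [pvEB]
    cases hc : (!PySem.Chars.isspace c &&
        (rest.length == 0 || PySem.Chars.isspace (rest.getD 0 ' '))) <;> simp [hsucc]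

theorem pvSB_head_space {c : Char} (hc : PySem.Chars.isspace c = true) (rest : List Char)
    (p q : Bool) : pvSB p (c :: rest) = pvSB q (c :: rest) := by
  simp [pvSB, hc]

theorem pvMap_cons (l : List Nat) (o : Int) :
    pvMap o ((0 : Nat) :: l.map (· + 1)) = o :: pvMap (o + 1) l := by
  rw [pvMap, List.map_cons,
    show List.map (fun (i : Nat) => (i : Int) + o) (l.map (· + 1)) = pvMap o (l.map (· + 1)) from rfl,
    pvMap_shift]
  norm_num

-- B's zipped boundary lists run the machine
theorem zip_eq_M (cs : List Char) : ∀ off : Int,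
    ((pvMap off (pvSB true cs)).zip (pvMap (off + 1) (pvEB cs)) = pvM cs off none) ∧
    (∀ s : Int, ∀ c rest, cs = c :: rest → PySem.Chars.isspace c = false →
      (s :: pvMap off (pvSB false cs)).zip (pvMap (off + 1) (pvEB cs)) = pvM cs off (some s)) := by
  induction cs with
  | nil =>
    intro off
    refine ⟨rfl, ?_⟩
    intro s c rest h
    exact absurd h (by simp)
  | cons c rest ih =>
    intro off
    by_cases hc : PySem.Chars.isspace c = true
    · -- head is a space: no boundary at index 0 on either list
      constructor
      · have hsb : pvSB true (c :: rest) = (pvSB true rest).map (· + 1) := by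
          simp [pvSB, hc]
        have heb : pvEB (c :: rest) = (pvEB rest).map (· + 1) := by
          simp [pvEB, hc]
        rw [hsb, heb, pvMap_shift, pvMap_shift, (ih (off + 1)).1]
        rw [pvM]
        simp only [hc, if_true]
      · intro s c' rest' h hns
        cases h
        rw [hns] at hc; exact absurd hc (by simp)
    · have hc' : PySem.Chars.isspace c = false := by
        cases h : PySem.Chars.isspace c
        · rfl
        · exact absurd h hc
      have hsbT : pvSB true (c :: rest) = 0 :: (pvSB false rest).map (· + 1) := by
        simp [pvSB, hc']
      have hsbF : pvSB false (c :: rest) = (pvSB false rest).map (· + 1) := by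
        simp [pvSB, hc']
      by_cases hend : (rest.length == 0 || PySem.Chars.isspace (rest.getD 0 ' ')) = true
      · -- the word ends at this character (next is a space or the string ends)
        have heb : pvEB (c :: rest) = 0 :: (pvEB rest).map (· + 1) := by
          cases rest with
          | nil => simp [pvEB, hc']
          | cons d ds =>
            have hd : PySem.Chars.isspace d = true := by simpa using hend
            simp [pvEB, hc', hd]
        constructor
        · rw [hsbT, heb, pvMap_cons, pvMap_cons, List.zip_cons_cons]
          rw [pvM]
          simp only [hc', Bool.false_eq_true, if_false]
          cases rest with
          | nil => simp [pvSB, pvEB, pvMap, pvM]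
          | cons d ds =>
            have hd : PySem.Chars.isspace d = true := by simpa using hend
            rw [pvSB_head_space hd ds false true, (ih (off + 1)).1]
            rw [pvM]
            simp only [hd, if_true]
            rw [pvM]
            simp only [hd, if_true]
        · intro s c' rest' h hns
          cases h
          rw [hsbF, heb, pvMap_shift, pvMap_cons, List.zip_cons_cons]
          rw [pvM]
          simp only [hns, Bool.false_eq_true, if_false]
          cases rest with
          | nil => simp [pvSB, pvEB, pvMap, pvM]
          | cons d ds =>
            have hd : PySem.Chars.isspace d = true := by simpa using hend
            rw [pvSB_head_space hd ds false true, (ih (off + 1)).1]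
            rw [pvM]
            simp only [hd, if_true]
            rw [pvM]
            simp only [hd, if_true]
      · -- the word continues (next character is non-space)
        obtain ⟨d, ds, rfl, hd⟩ : ∃ d ds, rest = d :: ds ∧ PySem.Chars.isspace d = false := by
          cases rest with
          | nil => simp at hend
          | cons d ds =>
            refine ⟨d, ds, rfl, ?_⟩
            cases h : PySem.Chars.isspace d
            · rfl
            · simp [h] at hend
        have heb : pvEB (c :: d :: ds) = (pvEB (d :: ds)).map (· + 1) := by
          simp [pvEB, hc', hd]
        constructor
        · rw [hsbT, heb, pvMap_cons, pvMap_shift]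
          rw [pvM]
          simp only [hc', Bool.false_eq_true, if_false]
          exact (ih (off + 1)).2 off d ds rfl hd
        · intro s c' rest' h hns
          cases h
          rw [hsbF, heb, pvMap_shift, pvMap_shift]
          rw [pvM]
          simp only [hns, Bool.false_eq_true, if_false]
          exact (ih (off + 1)).2 s d ds rfl hd

-- A's inner while = dropWhile/takeWhile on the non-space predicate
theorem pvSkipWord_eq (cs : List Char) (i : Int) :
    pvSkipWord cs i =
      (cs.dropWhile (fun d => PySem.Chars.isspace d == false),
       i + ((cs.takeWhile (fun d => PySem.Chars.isspace d == false)).length : Int)) := by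
  induction cs generalizing i with
  | nil => simp [pvSkipWord]
  | cons c rest ih =>
    by_cases h : PySem.Chars.isspace c
    · simp [pvSkipWord, h, List.dropWhile, List.takeWhile]
    · simp only [pvSkipWord, h, List.dropWhile_cons, List.takeWhile_cons, Bool.not_eq_true] at *
      rw [ih]
      simp
      omega

-- pending word: the machine runs to the end of the word in one stroke
theorem pvM_some (cs : List Char) : ∀ (j s : Int),
    pvM cs j (some s) =
      (s, j + ((cs.takeWhile (fun d => PySem.Chars.isspace d == false)).length : Int)) ::
        pvM (cs.dropWhile (fun d => PySem.Chars.isspace d == false))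
          (j + ((cs.takeWhile (fun d => PySem.Chars.isspace d == false)).length : Int)) none := by
  induction cs with
  | nil => intro j s; simp [pvM]
  | cons d ds ih =>
    intro j s
    by_cases hd : PySem.Chars.isspace d
    · rw [pvM]
      simp only [hd, if_true]
      simp [hd, pvM]
    · rw [pvM]
      simp only [hd, Bool.false_eq_true, if_false]
      rw [ih (j + 1) s]
      simp [hd]
      constructor
      · omega
      · congr 1
        omega

-- A's run-based scan runs the machine
theorem goA_eq_M (n : Nat) : ∀ (cs : List Char), cs.length ≤ n → ∀ i, pvGoA cs i = pvM cs i none := by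
  induction n with
  | zero =>
    intro cs h i
    have : cs = [] := List.eq_nil_of_length_eq_zero (Nat.le_zero.mp h)
    subst this; simp [pvGoA, pvM]
  | succ n ih =>
    intro cs h i
    match cs with
    | [] => simp [pvGoA, pvM]
    | c :: rest =>
      have hr : rest.length ≤ n := by simpa using h
      by_cases hc : PySem.Chars.isspace c
      · rw [pvGoA, pvM]
        simp only [hc, if_true]
        exact ih rest hr (i + 1)
      · rw [pvGoA, pvM]
        simp only [hc, Bool.false_eq_true, if_false]
        rw [pvSkipWord_eq]
        have hlen : (rest.dropWhile (fun d => PySem.Chars.isspace d == false)).length ≤ n :=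
          le_trans (List.length_dropWhile_le _ rest) hr
        rw [ih _ hlen]
        rw [pvM_some]

-- ===== VERDICT (by name: the statement is the Claim_ definition above) =====
theorem make_ids_spec : Claim_equal_make_ids := by
  intro sent _
  unfold Spec_make_ids make_ids make_ids_alt
  simp only []
  have hS : ((List.range sent.toList.length).filter (pvIsStartB sent.toList)).map
        (fun (i : Nat) => (i : Int)) = pvMap 0 (pvSB true sent.toList) := by
    have : (List.range sent.toList.length).filter (pvIsStartB sent.toList) =
        pvSB true sent.toList := by
      rw [← filter_pvSP]
      apply List.filter_congr
      intro i _
      exact pvIsStartB_eq sent.toList i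
    rw [this, pvMap]
    apply List.map_congr_left
    intro a _
    simp
  have hE : ((List.range sent.toList.length).filter
        (pvIsEndB sent.toList sent.toList.length)).map (fun (i : Nat) => (i : Int) + 1) =
      pvMap (0 + 1) (pvEB sent.toList) := by
    rw [filter_pvE, pvMap]
    apply List.map_congr_left
    intro a _
    ring
  rw [hS, hE, (zip_eq_M sent.toList 0).1]
  exact goA_eq_M sent.toList.length sent.toList (le_refl _) 0
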